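-- pv_equiv track=rewrite | github.com/NicoCoallier/aoc | aoc/solutions/twenty_twentyone/d8.py | part_one
-- ===== SOURCE A (Python) =====
-- from typing import Dict
-- from typing import List
-- from typing import Text
--
-- def part_one(data: List[int]) -> int:
--     """Solve part one
--     :param data: the input data
--
--     :return: Part one answer
--     :rtype: int
--     """
--     unique_mapper: Dict[Text, Text] = {
--         "1": "cf",
--         "4": "bcdf",
--         "7": "acf",
--         "8": "abcdefg",
--     }
--     results: int = 0
--     for t in data:
--         for k, v in unique_mapper.items():
--             for seg in t:
--                 if len(seg) == len(v):
--                     results += 1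
--     return results
-- ===== SOURCE B (Python) =====
-- from collections import Counter
--
-- def part_one(data):
--     """Solve part one: build a histogram of segment lengths in one pass,
--     then read it at the four unique-digit lengths."""
--     counts = Counter(len(seg) for t in data for seg in t)
--     return sum(counts[n] for n in (2, 3, 4, 7))
-- ===== Notes on version B (the rewrite author's own statement) =====
-- stated objective: alternative
-- what changed: Replaces the triple nested loop (rows x 4 mapper entries x segments, testing each segment's length against each entry) by a single pass building a Counter histogram of segment lengths, then summing the histogram at the four target lengths 2,3,4,7.
import Mathlib
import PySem

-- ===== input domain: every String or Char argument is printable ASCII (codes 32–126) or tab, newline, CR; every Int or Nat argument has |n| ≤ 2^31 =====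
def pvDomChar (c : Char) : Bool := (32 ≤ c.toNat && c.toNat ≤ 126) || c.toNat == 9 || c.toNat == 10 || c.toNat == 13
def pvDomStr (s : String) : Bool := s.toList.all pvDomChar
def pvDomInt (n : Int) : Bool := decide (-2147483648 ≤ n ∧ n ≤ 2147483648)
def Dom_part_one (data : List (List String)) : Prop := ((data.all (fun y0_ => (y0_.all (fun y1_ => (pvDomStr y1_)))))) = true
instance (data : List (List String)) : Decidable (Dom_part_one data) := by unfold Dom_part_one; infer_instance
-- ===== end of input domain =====

-- B replaces A's triple nested loop by a one-pass length histogram read at the four unique lengths; objective: alternative.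

-- ===== PORT A =====
-- the literal dict { "1": "cf", "4": "bcdf", "7": "acf", "8": "abcdefg" }
def pvMapperA : PySem.Dict String String :=
  ((((PySem.Dict.empty).insert "1" "cf").insert "4" "bcdf").insert "7" "acf").insert "8" "abcdefg"

def part_one (data : List (List String)) : Int :=
  data.foldl (fun results t =>
    (PySem.Dict.items pvMapperA).foldl (fun r kv =>
      t.foldl (fun r seg =>
        if PySem.Str.len seg = PySem.Str.len kv.2 then r + 1 else r) r) results) 0

-- ===== PORT B =====
def part_one_alt (data : List (List String)) : Int :=
  let counts : PySem.Dict Int Int :=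
    PySem.Dict.counter (data.flatMap (fun t => t.map (fun seg => PySem.Str.len seg)))
  ([2, 3, 4, 7] : List Int).foldl (fun s n => s + counts.getD n 0) 0

-- ===== PRECONDITION & SPEC =====
def Spec_part_one (data : List (List String)) (out : Int) : Prop := out = part_one_alt data
instance (data : List (List String)) (out : Int) : Decidable (Spec_part_one data out) := by unfold Spec_part_one; infer_instance

-- ===== CLAIM (what is proved, stated in full; the proofs are below) =====
def Claim_equal_part_one : Prop := ∀ (data : List (List String)), Dom_part_one data → Spec_part_one data (part_one data)

-- ===== LEMMAS AND PROOFS =====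

-- segments of t whose length is n
def pvCnt (t : List String) (n : Int) : Int :=
  ((t.countP (fun seg => PySem.Str.len seg == n) : Nat) : Int)

theorem pvRowA (t : List String) (r : Int) :
    (PySem.Dict.items pvMapperA).foldl (fun r kv =>
      t.foldl (fun r seg =>
        if PySem.Str.len seg = PySem.Str.len kv.2 then r + 1 else r) r) r
    = r + pvCnt t 2 + pvCnt t 4 + pvCnt t 3 + pvCnt t 7 := by
  show List.foldl _ r ([("1","cf"),("4","bcdf"),("7","acf"),("8","abcdefg")] : List (String × String)) = _
  simp only [List.foldl_cons, List.foldl_nil]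
  have h : ∀ (L : Int) (a : Int),
      t.foldl (fun r seg => if PySem.Str.len seg = L then r + 1 else r) a
        = a + pvCnt t L := by
    intro L a
    have := PySem.List.foldl_count_if (fun seg => PySem.Str.len seg == L) t a
    simpa [pvCnt, beq_iff_eq] using this
  have e2 : PySem.Str.len "cf" = 2 := by decide
  have e4 : PySem.Str.len "bcdf" = 4 := by decide
  have e3 : PySem.Str.len "acf" = 3 := by decide
  have e7 : PySem.Str.len "abcdefg" = 7 := by decide
  rw [e2, e4, e3, e7, h, h, h, h]

theorem pvA_eq (data : List (List String)) :
    part_one data = (data.map (fun t => pvCnt t 2 + pvCnt t 4 + pvCnt t 3 + pvCnt t 7)).sum := by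
  unfold part_one
  have : ∀ (r : Int),
      data.foldl (fun results t =>
        (PySem.Dict.items pvMapperA).foldl (fun r kv =>
          t.foldl (fun r seg =>
            if PySem.Str.len seg = PySem.Str.len kv.2 then r + 1 else r) r) results) r
      = r + (data.map (fun t => pvCnt t 2 + pvCnt t 4 + pvCnt t 3 + pvCnt t 7)).sum := by
    intro r
    have := PySem.List.foldl_add data (fun t => pvCnt t 2 + pvCnt t 4 + pvCnt t 3 + pvCnt t 7) r
    rw [← this]
    apply PySem.List.foldl_congr_mem
    intro r t _
    rw [pvRowA t r]; ring
  simpa using this 0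

theorem pvCount_row (t : List String) (n : Int) :
    ((List.count n (t.map (fun seg => PySem.Str.len seg)) : Nat) : Int) = pvCnt t n := by
  simp [pvCnt, List.count, List.countP_map, Function.comp_def]

theorem pvB_eq (data : List (List String)) :
    part_one_alt data = (data.map (fun t => pvCnt t 2 + pvCnt t 4 + pvCnt t 3 + pvCnt t 7)).sum := by
  unfold part_one_alt
  simp only [List.foldl_cons, List.foldl_nil, PySem.Dict.getD_counter, List.count_flatMap]
  induction data with
  | nil => simp
  | cons t rest ih =>
    simp only [List.map_cons, List.sum_cons, Function.comp_def] at *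
    push_cast at *
    rw [pvCount_row, pvCount_row, pvCount_row, pvCount_row] at *
    linarith [ih]

-- ===== VERDICT (by name: the statement is the Claim_ definition above) =====
theorem part_one_spec : Claim_equal_part_one := by
  intro data _
  unfold Spec_part_one
  rw [pvA_eq, pvB_eq]
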